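-- pv_equiv track=rewrite | github.com/sig6774/Coding_Test | 2024/Bronze/기능개발.py | solution
-- ===== SOURCE A (Python) =====
-- from collections import deque
--
-- def solution(progresses, speeds):
--
--     answer = []
--
--     check_days = []
--
--     progresses = deque(progresses)
--     speeds = deque(speeds)
--     cnt = 0
--
--     while len(progresses) >= 1:
--         if progresses[0] < 100:
--             progresses[0] += speeds[0]
--             cnt += 1
--
--         else:
--             progresses.popleft()
--             speeds.popleft()
--             check_days.append(cnt)
--             cnt = 0
--
--     idx = 0
--     for i in range(len(check_days)):
--         if check_days[idx] < check_days[i]: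
--             answer.append(i - idx)
--             idx = i
--
--     answer.append(len(check_days) - idx)
--
--     return answer
-- ===== SOURCE B (Python) =====
-- def solution(progresses, speeds):
--     # closed form: days to finish task = ceil((100 - p) / s); then one grouping pass
--     res = []
--     leader = None
--     count = 0
--     for p, s in zip(progresses, speeds):
--         d = 0 if p >= 100 else -((p - 100) // s)
--         if leader is None or leader < d:
--             if count:
--                 res.append(count)
--             leader = d
--             count = 1
--         else:
--             count += 1
--     res.append(count)
--     return res
-- ===== Notes on version B (the rewrite author's own statement) =====
-- stated objective: faster
-- what changed: B replaces A's day-by-day simulation of each task's progress with a closed-form ceiling division -((p-100)//s) per task and fuses the grouping into the same single pass over zip(progresses, speeds); intended as faster (a timing run could not measure a ratio: A already timed out at n=16 where B returned).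
import Mathlib
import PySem

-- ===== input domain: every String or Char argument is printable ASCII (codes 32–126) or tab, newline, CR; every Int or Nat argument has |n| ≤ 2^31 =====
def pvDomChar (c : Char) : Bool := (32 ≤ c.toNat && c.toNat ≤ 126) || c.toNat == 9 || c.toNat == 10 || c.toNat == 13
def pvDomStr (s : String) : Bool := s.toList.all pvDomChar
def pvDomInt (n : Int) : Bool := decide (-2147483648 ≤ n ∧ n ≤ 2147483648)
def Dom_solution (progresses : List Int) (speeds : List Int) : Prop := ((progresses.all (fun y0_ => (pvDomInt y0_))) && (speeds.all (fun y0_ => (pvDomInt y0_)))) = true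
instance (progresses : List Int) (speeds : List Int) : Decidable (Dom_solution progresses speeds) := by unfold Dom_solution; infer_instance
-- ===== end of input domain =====

-- B replaces A's day-by-day simulation with a closed-form ceiling division per task plus a
-- single grouping pass; intended as faster (a timing run gave no ratio: A timed out at n=16
-- where B returned). Equal on all inputs where A terminates and raises nothing (Pre_).


-- ===== PORT A =====
-- A's while-loop over the two deques; the '0 < s' test is only a totality guard
-- (Python diverges there; excluded by Pre_), and ps nonempty with ss empty is A's IndexError
-- (also excluded by Pre_).
def solutionWhile (ps ss : List Int) (cnt : Int) (cd : List Int) : List Int :=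
  match ps, ss with
  | [], _ => cd
  | p :: ps', s :: ss' =>
      if p < 100 then
        if h : 0 < s then solutionWhile ((p + s) :: ps') (s :: ss') (cnt + 1) cd
        else cd
      else solutionWhile ps' ss' 0 (cd ++ [cnt])
  | _ :: _, [] => cd
termination_by (ps.length, (match ps with | p :: _ => (100 - p).toNat | [] => 0))
decreasing_by
  · apply Prod.Lex.right; simp; omega
  · apply Prod.Lex.left; simp

def solution (progresses : List Int) (speeds : List Int) : List Int :=
  let check_days := solutionWhile progresses speeds 0 []
  let st := (PySem.List.pyRange 0 check_days.length 1).foldl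
    (fun (st : List Int × Int) i =>
      if PySem.List.pyGetD check_days st.2 0 < PySem.List.pyGetD check_days i 0 then
        (st.1 ++ [i - st.2], i)
      else st)
    ([], 0)
  st.1 ++ [(check_days.length : Int) - st.2]

-- ===== PORT B =====
def solution_alt (progresses : List Int) (speeds : List Int) : List Int :=
  let st := (progresses.zip speeds).foldl
    (fun (st : List Int × Option Int × Int) (pr : Int × Int) =>
      let d : Int := if 100 ≤ pr.1 then 0 else -(PySem.Int.floordiv (pr.1 - 100) pr.2)
      match st.2.1 with
      | none => ((if st.2.2 ≠ 0 then st.1 ++ [st.2.2] else st.1), some d, 1)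
      | some l =>
          if l < d then ((if st.2.2 ≠ 0 then st.1 ++ [st.2.2] else st.1), some d, 1)
          else (st.1, some l, st.2.2 + 1))
    ([], none, 0)
  st.1 ++ [st.2.2]

-- ===== PRECONDITION & SPEC =====
-- Pre_ = exactly where Python A returns: speeds at least as long as progresses (else IndexError)
-- and every unfinished task has positive speed (else A loops forever).
def Pre_solution (progresses : List Int) (speeds : List Int) : Prop :=
  progresses.length ≤ speeds.length ∧
  ∀ pr ∈ progresses.zip speeds, pr.1 < 100 → 0 < pr.2
instance (progresses : List Int) (speeds : List Int) : Decidable (Pre_solution progresses speeds) := by unfold Pre_solution; infer_instance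

def pvWitness_solution : List Int × List Int := ([93, 30, 55], [1, 30, 5])

def Spec_solution (progresses : List Int) (speeds : List Int) (out : List Int) : Prop := out = solution_alt progresses speeds
instance (progresses : List Int) (speeds : List Int) (out : List Int) : Decidable (Spec_solution progresses speeds out) := by unfold Spec_solution; infer_instance

-- ===== CLAIM (what is proved, stated in full; the proofs are below) =====
def Claim_equal_solution : Prop := ∀ (progresses : List Int) (speeds : List Int), Dom_solution progresses speeds → Pre_solution progresses speeds → Spec_solution progresses speeds (solution progresses speeds)

-- ===== LEMMAS AND PROOFS =====

-- days each task needs, in closed form (B's per-task value)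
def dayOf (pr : Int × Int) : Int := if 100 ≤ pr.1 then 0 else -(PySem.Int.floordiv (pr.1 - 100) pr.2)

lemma dayOf_char (p s : Int) (hs : 0 < s) (hp : p < 100) (q : Int) :
    dayOf (p, s) = q ↔ (q - 1) * s < 100 - p ∧ 100 - p ≤ q * s := by
  have h := PySem.Int.neg_floordiv_neg_eq_iff_of_pos (a := 100 - p) (b := s) (q := q) hs
  simpa [dayOf, not_le.mpr hp, show -(100 - p) = p - 100 by ring] using h

-- A's simulation of one head task equals the closed form
lemma solutionWhile_head (s : Int) (hs : 0 < s) :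
    ∀ (n : Nat) (p : Int), (100 - p).toNat = n → ∀ (ps' ss' : List Int) (cnt : Int) (cd : List Int),
      solutionWhile (p :: ps') (s :: ss') cnt cd
        = solutionWhile ps' ss' 0 (cd ++ [cnt + dayOf (p, s)]) := by
  intro n
  induction n using Nat.strong_induction_on with
  | _ n ih =>
    intro p hn ps' ss' cnt cd
    by_cases hp : p < 100
    · rw [solutionWhile]
      simp only [if_pos hp, dif_pos hs]
      have hlt : (100 - (p + s)).toNat < n := by omega
      rw [ih _ hlt (p + s) rfl ps' ss' (cnt + 1) cd]
      have : cnt + 1 + dayOf (p + s, s) = cnt + dayOf (p, s) := by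
        by_cases hp2 : p + s < 100
        · have h1 := (dayOf_char (p + s) s hs hp2 (dayOf (p + s, s))).mp rfl
          have h2 : dayOf (p, s) = dayOf (p + s, s) + 1 := by
            rw [dayOf_char p s hs hp]
            constructor <;> nlinarith [h1.1, h1.2]
          omega
        · have h1 : dayOf (p + s, s) = 0 := by simp [dayOf, not_lt.mp hp2]
          have h2 : dayOf (p, s) = 1 := by
            rw [dayOf_char p s hs hp]; constructor <;> nlinarith
          omega
      rw [this]
    · rw [solutionWhile]
      simp only [if_neg hp]
      have : dayOf (p, s) = 0 := by simp [dayOf, not_lt.mp hp]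
      simp [this]

-- A's whole while-loop produces the closed-form day list
lemma solutionWhile_eq :
    ∀ (ps ss : List Int), ps.length ≤ ss.length →
      (∀ pr ∈ ps.zip ss, pr.1 < 100 → 0 < pr.2) → ∀ (cd : List Int),
      solutionWhile ps ss 0 cd = cd ++ (ps.zip ss).map dayOf := by
  intro ps
  induction ps with
  | nil => intro ss _ _ cd; rw [solutionWhile]; simp
  | cons p ps' ih =>
    intro ss hlen hpos cd
    match ss with
    | [] => simp at hlen
    | s :: ss' =>
      by_cases hp : p < 100
      · have hs : 0 < s := hpos (p, s) (by simp) hp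
        rw [solutionWhile_head s hs _ p rfl ps' ss' 0 cd]
        rw [ih ss' (by simpa using hlen) (fun pr h => hpos pr (by simp [h]))]
        simp
      · rw [solutionWhile]
        simp only [if_neg hp]
        rw [ih ss' (by simpa using hlen) (fun pr h => hpos pr (by simp [h]))]
        have : dayOf (p, s) = 0 := by simp [dayOf, not_lt.mp hp]
        simp [this]

-- B's grouping step (what solution_alt folds with, after the day is computed)
def groupStep (st : List Int × Option Int × Int) (d : Int) : List Int × Option Int × Int :=
  match st.2.1 with
  | none => ((if st.2.2 ≠ 0 then st.1 ++ [st.2.2] else st.1), some d, 1)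
  | some l =>
      if l < d then ((if st.2.2 ≠ 0 then st.1 ++ [st.2.2] else st.1), some d, 1)
      else (st.1, some l, st.2.2 + 1)

-- A's index-based grouping loop agrees with B's single-pass grouping fold, from matching states
lemma group_aux (cd : List Int) :
    ∀ (k : Nat) (m : Nat) (_hm : m = cd.length - k) (_hk : k ≤ cd.length)
      (ans : List Int) (idx : Int) (l : Int),
      0 ≤ idx → idx < (m : Int) →
      PySem.List.pyGetD cd idx 0 = l →
      (((PySem.List.pyRange (m : Int) (cd.length : Int) 1).foldl
          (fun (st : List Int × Int) i =>
            if PySem.List.pyGetD cd st.2 0 < PySem.List.pyGetD cd i 0 then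
              (st.1 ++ [i - st.2], i)
            else st)
          (ans, idx)).1
        ++ [(cd.length : Int) - ((PySem.List.pyRange (m : Int) (cd.length : Int) 1).foldl
          (fun (st : List Int × Int) i =>
            if PySem.List.pyGetD cd st.2 0 < PySem.List.pyGetD cd i 0 then
              (st.1 ++ [i - st.2], i)
            else st)
          (ans, idx)).2])
      = (((cd.drop m).foldl groupStep (ans, some l, (m : Int) - idx)).1
          ++ [((cd.drop m).foldl groupStep (ans, some l, (m : Int) - idx)).2.2]) := by
  intro k
  induction k with
  | zero =>
    intro m hm hk ans idx l h0 hlt hl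
    have hme : m = cd.length := by omega
    subst hme
    rw [PySem.List.pyRange_one_eq_nil (by omega)]
    simp
  | succ k' ih =>
    intro m hm hk ans idx l h0 hlt hl
    have hml : m < cd.length := by omega
    have hcons := PySem.List.pyRange_one_cons (a := (m : Int)) (b := (cd.length : Int)) (by exact_mod_cast hml)
    rw [hcons]
    have hdrop : cd.drop m = cd[m] :: cd.drop (m + 1) := by
      rw [List.drop_eq_getElem_cons hml]
    rw [hdrop]
    simp only [List.foldl_cons]
    have hgm : PySem.List.pyGetD cd (m : Int) 0 = cd[m] := by
      rw [PySem.List.pyGetD_natCast]; simp [List.getD, hml]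
    have hcount : (m : Int) - idx ≠ 0 := by omega
    rw [hl, hgm]
    by_cases hnew : l < cd[m]
    · rw [if_pos hnew]
      have hstep : groupStep (ans, some l, (m : Int) - idx) cd[m]
          = (ans ++ [(m : Int) - idx], some cd[m], 1) := by
        simp [groupStep, if_pos hnew, hcount]
      rw [hstep]
      have H := ih (m + 1) (by omega) (by omega) (ans ++ [(m : Int) - idx]) (m : Int) cd[m]
        (by positivity) (by push_cast; omega) hgm
      have h1 : (((m + 1 : Nat)) : Int) - (m : Int) = 1 := by push_cast; ring
      rw [h1] at H
      have h2 : (((m + 1 : Nat)) : Int) = (m : Int) + 1 := by push_cast; ring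
      rw [h2] at H
      exact H
    · rw [if_neg hnew]
      have hstep : groupStep (ans, some l, (m : Int) - idx) cd[m]
          = (ans, some l, (m : Int) - idx + 1) := by
        simp [groupStep, if_neg hnew]
      rw [hstep]
      have H := ih (m + 1) (by omega) (by omega) ans idx l h0 (by push_cast; omega) hl
      have h2 : (((m + 1 : Nat)) : Int) = (m : Int) + 1 := by push_cast; ring
      rw [h2] at H
      have h3 : (m : Int) - idx + 1 = (m : Int) + 1 - idx := by ring
      rw [h3]
      exact H

-- A's grouping (pyRange fold from ([],0)) equals B's grouping fold from ([], none, 0)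
lemma group_eq (cd : List Int) :
    ((PySem.List.pyRange 0 (cd.length : Int) 1).foldl
        (fun (st : List Int × Int) i =>
          if PySem.List.pyGetD cd st.2 0 < PySem.List.pyGetD cd i 0 then
            (st.1 ++ [i - st.2], i)
          else st)
        ([], 0)).1
      ++ [(cd.length : Int) - ((PySem.List.pyRange 0 (cd.length : Int) 1).foldl
        (fun (st : List Int × Int) i =>
          if PySem.List.pyGetD cd st.2 0 < PySem.List.pyGetD cd i 0 then
            (st.1 ++ [i - st.2], i)
          else st)
        ([], 0)).2]
    = (cd.foldl groupStep ([], none, 0)).1 ++ [(cd.foldl groupStep ([], none, 0)).2.2] := by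
  match cd with
  | [] => simp [PySem.List.pyRange_one_eq_nil]
  | c :: cd' =>
    have hcons := PySem.List.pyRange_one_cons (a := (0 : Int)) (b := ((c :: cd').length : Int)) (by simp)
    simp only [hcons, List.foldl_cons]
    rw [PySem.List.pyGetD_zero_cons]
    rw [if_neg (lt_irrefl c)]
    have hg0 : groupStep ([], none, 0) c = ([], some c, 1) := by simp [groupStep]
    rw [hg0]
    have H := group_aux (c :: cd') cd'.length 1 (by simp) (by simp) [] 0 c (by omega) (by omega)
      (PySem.List.pyGetD_zero_cons c cd' 0)
    simpa using H

lemma solution_alt_eq_group (progresses speeds : List Int) :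
    solution_alt progresses speeds
      = ((((progresses.zip speeds).map dayOf).foldl groupStep ([], none, 0)).1
          ++ [(((progresses.zip speeds).map dayOf).foldl groupStep ([], none, 0)).2.2]) := by
  unfold solution_alt
  simp only [List.foldl_map]
  rfl

-- ===== VERDICT (by name: the statement is the Claim_ definition above) =====
theorem solution_spec : Claim_equal_solution := by
  intro progresses speeds _ hpre
  unfold Spec_solution
  unfold solution
  rw [solutionWhile_eq progresses speeds hpre.1 hpre.2 []]
  rw [solution_alt_eq_group]
  simpa using group_eq ((progresses.zip speeds).map dayOf)
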